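-- pv_equiv track=rewrite | github.com/rdio/translate-toolkit | pootle/translatepage.py | highlightdiffs
-- ===== SOURCE A (Python) =====
-- def highlightdiffs(text, diffs, issrc=True):
--   """highlights the differences in diffs in the text.
--   diffs should be list of diff opcodes
--   issrc specifies whether to use the src or destination positions in reconstructing the text"""
--   if issrc:
--     diffstart = [(i1, 'start', tag) for (tag, i1, i2, j1, j2) in diffs if tag != 'equal']
--     diffstop = [(i2, 'stop', tag) for (tag, i1, i2, j1, j2) in diffs if tag != 'equal']
--   else:
--     diffstart = [(j1, 'start', tag) for (tag, i1, i2, j1, j2) in diffs if tag != 'equal']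
--     diffstop = [(j2, 'stop', tag) for (tag, i1, i2, j1, j2) in diffs if tag != 'equal']
--   diffswitches = diffstart + diffstop
--   diffswitches.sort()
--   textdiff = ""
--   textnest = 0
--   textpos = 0
--   for i, switch, tag in diffswitches:
--     textdiff += text[textpos:i]
--     if switch == 'start':
--       textnest += 1
--     elif switch == 'stop':
--       textnest -= 1
--     if switch == 'start' and textnest == 1:
--       # start of a textition
--       textdiff += "<span style='background-color: #ffff00'>"
--     elif switch == 'stop' and textnest == 0:
--       # start of an equals block
--       textdiff += "</span>"
--     textpos = i
--   textdiff += text[textpos:]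
--   return textdiff
-- ===== SOURCE B (Python) =====
-- def highlightdiffs(text, diffs, issrc=True):
--   """highlights the differences in diffs in the text (same output as A).
--
--   Instead of sorting one combined list of tagged start/stop switch tuples,
--   sort the start positions and the stop positions separately as plain ints
--   and sweep them with a two-pointer merge (starts win ties, as in A where
--   'start' < 'stop'), emitting the span markers at nesting transitions."""
--   if issrc:
--     pairs = [(i1, i2) for (tag, i1, i2, j1, j2) in diffs if tag != 'equal']
--   else:
--     pairs = [(j1, j2) for (tag, i1, i2, j1, j2) in diffs if tag != 'equal']
--   starts = sorted(p[0] for p in pairs)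
--   stops = sorted(p[1] for p in pairs)
--   n = len(pairs)
--   out = ""
--   nest = 0
--   pos = 0
--   si = ti = 0
--   while si < n or ti < n:
--     if si < n and (ti == n or starts[si] <= stops[ti]):
--       p = starts[si]
--       si += 1
--       out += text[pos:p]
--       nest += 1
--       if nest == 1:
--         out += "<span style='background-color: #ffff00'>"
--     else:
--       p = stops[ti]
--       ti += 1
--       out += text[pos:p]
--       nest -= 1
--       if nest == 0:
--         out += "</span>"
--     pos = p
--   out += text[pos:]
--   return out
-- ===== Notes on version B (the rewrite author's own statement) =====
-- stated objective: alternative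
-- what changed: Instead of building one combined list of tagged (position, 'start'/'stop', tag) switch tuples and sorting it with tuple comparisons, B sorts the start positions and the stop positions separately as plain integers and sweeps them with a two-pointer merge (starts win ties, mirroring 'start' < 'stop'), emitting the span markers at nesting transitions in one pass.
import Mathlib
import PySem

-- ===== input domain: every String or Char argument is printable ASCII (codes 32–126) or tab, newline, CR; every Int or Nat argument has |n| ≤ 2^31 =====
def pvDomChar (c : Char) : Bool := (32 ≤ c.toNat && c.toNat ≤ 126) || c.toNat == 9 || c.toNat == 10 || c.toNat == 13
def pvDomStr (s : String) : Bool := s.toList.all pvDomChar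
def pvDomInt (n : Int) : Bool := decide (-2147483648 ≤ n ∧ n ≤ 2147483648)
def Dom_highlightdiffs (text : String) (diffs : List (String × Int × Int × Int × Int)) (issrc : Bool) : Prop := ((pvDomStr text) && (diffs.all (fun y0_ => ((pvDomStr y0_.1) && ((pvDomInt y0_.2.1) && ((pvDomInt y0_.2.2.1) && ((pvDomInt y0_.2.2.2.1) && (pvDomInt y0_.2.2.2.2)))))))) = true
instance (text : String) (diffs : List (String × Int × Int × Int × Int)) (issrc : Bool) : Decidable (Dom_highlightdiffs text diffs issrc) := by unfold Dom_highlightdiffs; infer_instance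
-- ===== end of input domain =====

-- B replaces A's single sort of tagged (pos, 'start'/'stop', tag) switch tuples by two plain
-- integer sorts (start positions, stop positions) swept with a two-pointer merge; alternative
-- decomposition, same output.

-- ===== PORT A =====
-- strings are handled as code-point lists (exact); Python's default tuple sort key
-- (i, switch, tag) is ported with `toLex`, whose `<` is exactly Python's tuple comparison.
def pvOpenSpan : List Char := "<span style='background-color: #ffff00'>".toList
def pvCloseSpan : List Char := "</span>".toList

-- the body of A's `for i, switch, tag in diffswitches` loop
def pvStepA (text : List Char) (st : List Char × Int × Int) (e : Int × String × String) :
    List Char × Int × Int :=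
  let textdiff := st.1 ++ PySem.List.slice text (some st.2.2) (some e.1)
  let textnest := if e.2.1 == "start" then st.2.1 + 1
    else if e.2.1 == "stop" then st.2.1 - 1 else st.2.1
  let textdiff := if e.2.1 == "start" && textnest == 1 then textdiff ++ pvOpenSpan
    else if e.2.1 == "stop" && textnest == 0 then textdiff ++ pvCloseSpan else textdiff
  (textdiff, textnest, e.1)

def highlightdiffs (text : String) (diffs : List (String × Int × Int × Int × Int)) (issrc : Bool) : String :=
  let diffstart := if issrc then (diffs.filter (fun d => d.1 != "equal")).map (fun d => (d.2.1, "start", d.1))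
    else (diffs.filter (fun d => d.1 != "equal")).map (fun d => (d.2.2.2.1, "start", d.1))
  let diffstop := if issrc then (diffs.filter (fun d => d.1 != "equal")).map (fun d => (d.2.2.1, "stop", d.1))
    else (diffs.filter (fun d => d.1 != "equal")).map (fun d => (d.2.2.2.2, "stop", d.1))
  let diffswitches := PySem.List.sorted (diffstart ++ diffstop)
    (fun e => toLex (e.1, toLex (e.2.1, e.2.2))) false
  let fin := diffswitches.foldl (pvStepA text.toList) ([], 0, 0)
  String.ofList (fin.1 ++ PySem.List.slice text.toList (some fin.2.2) none)

-- ===== PORT B =====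
-- B's `while si < n or ti < n` two-pointer sweep; the second branch is guarded by
-- `ti < n`, which holds whenever Python reaches it (ti is only incremented while ti < n).
def pvBLoop (text : List Char) (starts stops : List Int) (n si ti : Nat)
    (out : List Char) (nest pos : Int) : List Char :=
  if h1 : si < n ∧ (ti = n ∨ starts.getD si 0 ≤ stops.getD ti 0) then
    let p := starts.getD si 0
    let out := out ++ PySem.List.slice text (some pos) (some p)
    let nest := nest + 1
    let out := if nest == 1 then out ++ pvOpenSpan else out
    pvBLoop text starts stops n (si + 1) ti out nest p
  else if h2 : ti < n then
    let p := stops.getD ti 0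
    let out := out ++ PySem.List.slice text (some pos) (some p)
    let nest := nest - 1
    let out := if nest == 0 then out ++ pvCloseSpan else out
    pvBLoop text starts stops n si (ti + 1) out nest p
  else
    out ++ PySem.List.slice text (some pos) none
termination_by (n - si) + (n - ti)
decreasing_by
  · omega
  · omega

def highlightdiffs_alt (text : String) (diffs : List (String × Int × Int × Int × Int)) (issrc : Bool) : String :=
  let pairs := if issrc then (diffs.filter (fun d => d.1 != "equal")).map (fun d => (d.2.1, d.2.2.1))
    else (diffs.filter (fun d => d.1 != "equal")).map (fun d => (d.2.2.2.1, d.2.2.2.2))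
  let starts := PySem.List.sorted (pairs.map (fun p => p.1)) (fun x => x) false
  let stops := PySem.List.sorted (pairs.map (fun p => p.2)) (fun x => x) false
  String.ofList (pvBLoop text.toList starts stops pairs.length 0 0 [] 0 0)

-- ===== PRECONDITION & SPEC =====
def Spec_highlightdiffs (text : String) (diffs : List (String × Int × Int × Int × Int)) (issrc : Bool) (out : String) : Prop := out = highlightdiffs_alt text diffs issrc
instance (text : String) (diffs : List (String × Int × Int × Int × Int)) (issrc : Bool) (out : String) : Decidable (Spec_highlightdiffs text diffs issrc out) := by unfold Spec_highlightdiffs; infer_instance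

-- ===== CLAIM (what is proved, stated in full; the proofs are below) =====
def Claim_equal_highlightdiffs : Prop := ∀ (text : String) (diffs : List (String × Int × Int × Int × Int)) (issrc : Bool), Dom_highlightdiffs text diffs issrc → Spec_highlightdiffs text diffs issrc (highlightdiffs text diffs issrc)

-- ===== LEMMAS AND PROOFS =====

-- common core of both loop bodies: events are (position, isStart)
def pvStep (text : List Char) (st : List Char × Int × Int) (e : Int × Bool) :
    List Char × Int × Int :=
  let out := st.1 ++ PySem.List.slice text (some st.2.2) (some e.1)
  let nest := if e.2 then st.2.1 + 1 else st.2.1 - 1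
  let out := if e.2 && nest == 1 then out ++ pvOpenSpan
    else if !e.2 && nest == 0 then out ++ pvCloseSpan else out
  (out, nest, e.1)

def pvProj (e : Int × String × String) : Int × Bool := (e.1, e.2.1 == "start")

def pvMerge : List Int → List Int → List (Int × Bool)
  | [], ys => ys.map (fun y => (y, false))
  | x :: xs, [] => (x :: xs).map (fun x => (x, true))
  | x :: xs, y :: ys =>
    if x ≤ y then (x, true) :: pvMerge xs (y :: ys) else (y, false) :: pvMerge (x :: xs) ys

-- the order in which A's sorted switch list arranges projected events
def pvEvLE (a b : Int × Bool) : Prop := a.1 < b.1 ∨ (a.1 = b.1 ∧ (a.2 = true ∨ b.2 = false))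

theorem pvStepA_eq (text : List Char) (st : List Char × Int × Int) (e : Int × String × String)
    (h : e.2.1 = "start" ∨ e.2.1 = "stop") :
    pvStepA text st e = pvStep text st (pvProj e) := by
  obtain ⟨i, sw, tag⟩ := e
  rcases h with h | h <;> simp_all [pvStepA, pvStep, pvProj]

theorem pvFoldA_eq (text : List Char) (l : List (Int × String × String))
    (h : ∀ e ∈ l, e.2.1 = "start" ∨ e.2.1 = "stop") (st : List Char × Int × Int) :
    l.foldl (pvStepA text) st = (l.map pvProj).foldl (pvStep text) st := by
  induction l generalizing st with
  | nil => rfl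
  | cons e l ih =>
    rw [List.foldl_cons, List.map_cons, List.foldl_cons,
      pvStepA_eq text st e (h e List.mem_cons_self)]
    exact ih (fun e' he' => h e' (List.mem_cons_of_mem _ he')) _

theorem pvMerge_perm (xs ys : List Int) :
    (pvMerge xs ys).Perm (xs.map (fun x => (x, true)) ++ ys.map (fun y => (y, false))) := by
  fun_induction pvMerge xs ys with
  | case1 ys => simp
  | case2 x xs => simp
  | case3 x xs y ys hxy ih => simpa [pvMerge, hxy] using ih.cons (x, true)
  | case4 x xs y ys hxy ih =>
    simp only [List.map_cons]
    refine (ih.cons (y, false)).trans ?_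
    exact (List.perm_middle (a := (y, false))
      (l₁ := (x :: xs).map (fun x => (x, true))) (l₂ := ys.map (fun y => (y, false)))).symm

theorem mem_pvMerge (xs ys : List Int) (e : Int × Bool) (h : e ∈ pvMerge xs ys) :
    (e.2 = true ∧ e.1 ∈ xs) ∨ (e.2 = false ∧ e.1 ∈ ys) := by
  have := (pvMerge_perm xs ys).mem_iff.mp h
  rcases List.mem_append.mp this with h' | h' <;>
    rcases List.mem_map.mp h' with ⟨z, hz, rfl⟩ <;> simp_all

theorem pvMerge_pairwise (xs ys : List Int)
    (hx : xs.Pairwise (· ≤ ·)) (hy : ys.Pairwise (· ≤ ·)) :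
    (pvMerge xs ys).Pairwise pvEvLE := by
  fun_induction pvMerge xs ys with
  | case1 ys =>
    rw [List.pairwise_map]
    exact hy.imp (fun h => by simp [pvEvLE]; omega)
  | case2 x xs =>
    rw [List.pairwise_map]
    exact hx.imp (fun h => by simp [pvEvLE]; omega)
  | case3 x xs y ys hxy ih =>
    refine List.Pairwise.cons ?_ (ih hx.tail hy)
    rintro ⟨z, b⟩ he
    rcases mem_pvMerge _ _ _ he with ⟨hb, hm⟩ | ⟨hb, hm⟩ <;> simp only at hb hm
    · have := List.rel_of_pairwise_cons hx hm
      simp [pvEvLE]; omega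
    · rcases List.mem_cons.mp hm with rfl | hm'
      · simp [pvEvLE]; omega
      · have := List.rel_of_pairwise_cons hy hm'
        simp [pvEvLE]; omega
  | case4 x xs y ys hxy ih =>
    refine List.Pairwise.cons ?_ (ih hx hy.tail)
    rintro ⟨z, b⟩ he
    rcases mem_pvMerge _ _ _ he with ⟨hb, hm⟩ | ⟨hb, hm⟩ <;> simp only at hb hm <;> subst hb
    · rcases List.mem_cons.mp hm with rfl | hm'
      · simp [pvEvLE]; omega
      · have := List.rel_of_pairwise_cons hx hm'
        simp [pvEvLE]; omega
    · have := List.rel_of_pairwise_cons hy hm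
      simp [pvEvLE]; omega

theorem pvEvLE_antisymm (a b : Int × Bool) (h1 : pvEvLE a b) (h2 : pvEvLE b a) : a = b := by
  obtain ⟨i, u⟩ := a; obtain ⟨j, v⟩ := b
  simp only [pvEvLE] at h1 h2
  rcases h1 with h1 | ⟨rfl, h1⟩ <;> rcases h2 with h2 | ⟨e2, h2⟩ <;> try omega
  cases u <;> cases v <;> simp_all

theorem pvSortedA_pairwise (L : List (Int × String × String))
    (h : ∀ e ∈ L, e.2.1 = "start" ∨ e.2.1 = "stop") :
    ((PySem.List.sorted L (fun e => toLex (e.1, toLex (e.2.1, e.2.2))) false).map pvProj).Pairwise pvEvLE := by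
  rw [List.pairwise_map]
  refine (PySem.List.sorted_pairwise L (fun e => toLex (e.1, toLex (e.2.1, e.2.2)))).imp_of_mem ?_
  intro a b ha hb hab
  have ha' := (PySem.List.sorted_perm L (fun e => toLex (e.1, toLex (e.2.1, e.2.2))) false).mem_iff.mp ha
  have hb' := (PySem.List.sorted_perm L (fun e => toLex (e.1, toLex (e.2.1, e.2.2))) false).mem_iff.mp hb
  have hab' : a.1 < b.1 ∨ (a.1 = b.1 ∧ (a.2.1 < b.2.1 ∨ (a.2.1 = b.2.1 ∧ a.2.2 ≤ b.2.2))) := by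
    simpa only [Prod.Lex.le_iff, ofLex_toLex] using hab
  rcases hab' with hlt | ⟨heq, hle2⟩
  · exact Or.inl hlt
  · refine Or.inr ⟨heq, ?_⟩
    rcases hle2 with hswlt | ⟨hsweq, _⟩
    · rcases h a ha' with haS | haS <;> rcases h b hb' with hbS | hbS <;>
        rw [haS, hbS] at hswlt
      · exact absurd hswlt (lt_irrefl _)
      · exact Or.inl (by simp [pvProj, haS])
      · exact absurd hswlt (by rw [String.lt_iff_toList_lt]; decide)
      · exact absurd hswlt (lt_irrefl _)
    · have : (a.2.1 == "start") = (b.2.1 == "start") := by rw [hsweq]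
      simp only [pvProj, this]
      cases hc : (b.2.1 == "start") <;> simp

theorem pvMerge_nil_right (xs : List Int) : pvMerge xs [] = xs.map (fun x => (x, true)) := by
  cases xs <;> simp [pvMerge]

theorem pvMerge_cons_nil (x : Int) (xs : List Int) :
    pvMerge (x :: xs) [] = (x, true) :: pvMerge xs [] := by
  simp [pvMerge_nil_right]

theorem pvMerge_nil_cons (y : Int) (ys : List Int) :
    pvMerge [] (y :: ys) = (y, false) :: pvMerge [] ys := by
  simp [pvMerge]

theorem pvMerge_cons_cons_le (x y : Int) (xs ys : List Int) (h : x ≤ y) :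
    pvMerge (x :: xs) (y :: ys) = (x, true) :: pvMerge xs (y :: ys) := by
  simp [pvMerge, h]

theorem pvMerge_cons_cons_gt (x y : Int) (xs ys : List Int) (h : ¬ x ≤ y) :
    pvMerge (x :: xs) (y :: ys) = (y, false) :: pvMerge (x :: xs) ys := by
  simp [pvMerge, h]

theorem pvBLoop_eq (text : List Char) (starts stops : List Int) (n si ti : Nat)
    (out : List Char) (nest pos : Int)
    (h1 : starts.length = n) (h2 : stops.length = n) (h3 : si ≤ n) (h4 : ti ≤ n) :
    pvBLoop text starts stops n si ti out nest pos =
      (let fin := (pvMerge (starts.drop si) (stops.drop ti)).foldl (pvStep text) (out, nest, pos)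
       fin.1 ++ PySem.List.slice text (some fin.2.2) none) := by
  fun_induction pvBLoop text starts stops n si ti out nest pos with
  | case1 si ti out0 nest0 pos0 hc p o1 n1 o2 ih =>
    obtain ⟨hsi, hcond⟩ := hc
    rw [ih (by omega) h4]
    have hd : starts.drop si = starts.getD si 0 :: starts.drop (si + 1) := by
      rw [List.getD_eq_getElem _ _ (by omega)]
      exact List.drop_eq_getElem_cons (by omega)
    have hst : pvStep text (out0, nest0, pos0) (starts.getD si 0, true) =
        (if ((nest0 + 1) == 1) = true then
            out0 ++ PySem.List.slice text (some pos0) (some (starts.getD si 0)) ++ pvOpenSpan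
          else out0 ++ PySem.List.slice text (some pos0) (some (starts.getD si 0)),
          nest0 + 1, starts.getD si 0) := by
      simp [pvStep]
    by_cases htin : ti = n
    · have hnil : stops.drop ti = [] := by rw [htin, ← h2]; exact List.drop_length
      rw [hd, hnil, pvMerge_cons_nil, List.foldl_cons, hst]
      rfl
    · have hle : starts.getD si 0 ≤ stops.getD ti 0 := hcond.resolve_left htin
      have hd2 : stops.drop ti = stops.getD ti 0 :: stops.drop (ti + 1) := by
        rw [List.getD_eq_getElem _ _ (by omega)]
        exact List.drop_eq_getElem_cons (by omega)
      rw [hd, hd2, pvMerge_cons_cons_le _ _ _ _ hle, List.foldl_cons, hst, ← hd2]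
      rfl
  | case2 si ti out0 nest0 pos0 hc hti p o1 n1 o2 ih =>
    rw [ih h3 (by omega)]
    have hd2 : stops.drop ti = stops.getD ti 0 :: stops.drop (ti + 1) := by
      rw [List.getD_eq_getElem _ _ (by omega)]
      exact List.drop_eq_getElem_cons (by omega)
    have hst : pvStep text (out0, nest0, pos0) (stops.getD ti 0, false) =
        (if ((nest0 - 1) == 0) = true then
            out0 ++ PySem.List.slice text (some pos0) (some (stops.getD ti 0)) ++ pvCloseSpan
          else out0 ++ PySem.List.slice text (some pos0) (some (stops.getD ti 0)),
          nest0 - 1, stops.getD ti 0) := by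
      simp [pvStep]
    by_cases hsin : si < n
    · have hgt : ¬ starts.getD si 0 ≤ stops.getD ti 0 := by
        intro hle
        exact hc ⟨hsin, Or.inr hle⟩
      have hd : starts.drop si = starts.getD si 0 :: starts.drop (si + 1) := by
        rw [List.getD_eq_getElem _ _ (by omega)]
        exact List.drop_eq_getElem_cons (by omega)
      rw [hd, hd2, pvMerge_cons_cons_gt _ _ _ _ hgt, List.foldl_cons, hst, ← hd]
      rfl
    · have hnil : starts.drop si = [] := List.drop_eq_nil_of_le (by omega)
      rw [hnil, hd2, pvMerge_nil_cons, List.foldl_cons, hst]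
      rfl
  | case3 si ti out0 nest0 pos0 hc hti =>
    have e1 : starts.drop si = [] := by
      apply List.drop_eq_nil_of_le
      rcases Nat.lt_or_ge si n with h | h
      · exact absurd ⟨h, Or.inl (by omega)⟩ hc
      · omega
    have e2 : stops.drop ti = [] := List.drop_eq_nil_of_le (by omega)
    rw [e1, e2]
    simp [pvMerge]

theorem pvMain (text : List Char) (F : List (String × Int × Int × Int × Int))
    (f g : (String × Int × Int × Int × Int) → Int) :
    (let L := F.map (fun d => (f d, "start", d.1)) ++ F.map (fun d => (g d, "stop", d.1))
     let fin := (PySem.List.sorted L (fun e => toLex (e.1, toLex (e.2.1, e.2.2))) false).foldl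
       (pvStepA text) ([], 0, 0)
     fin.1 ++ PySem.List.slice text (some fin.2.2) none) =
    (let pairs := F.map (fun d => (f d, g d))
     pvBLoop text (PySem.List.sorted (pairs.map (fun p => p.1)) (fun x => x) false)
       (PySem.List.sorted (pairs.map (fun p => p.2)) (fun x => x) false) pairs.length 0 0 [] 0 0) := by
  simp only []
  set L := F.map (fun d => (f d, "start", d.1)) ++ F.map (fun d => (g d, "stop", d.1)) with hL
  set pairs := F.map (fun d => (f d, g d)) with hpairs
  set starts := PySem.List.sorted (pairs.map (fun p => p.1)) (fun x => x) false with hstarts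
  set stops := PySem.List.sorted (pairs.map (fun p => p.2)) (fun x => x) false with hstops
  have hswL : ∀ e ∈ L, e.2.1 = "start" ∨ e.2.1 = "stop" := by
    intro e he
    rcases List.mem_append.mp he with h | h <;>
      rcases List.mem_map.mp h with ⟨d, _, rfl⟩ <;> simp
  have hsw : ∀ e ∈ PySem.List.sorted L (fun e => toLex (e.1, toLex (e.2.1, e.2.2))) false,
      e.2.1 = "start" ∨ e.2.1 = "stop" := by
    intro e he
    exact hswL e ((PySem.List.sorted_perm L _ false).mem_iff.mp he)
  rw [pvFoldA_eq text _ hsw]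
  rw [pvBLoop_eq text starts stops pairs.length 0 0 [] 0 0
    (by rw [hstarts, PySem.List.length_sorted, List.length_map])
    (by rw [hstops, PySem.List.length_sorted, List.length_map])
    (Nat.zero_le _) (Nat.zero_le _)]
  simp only [List.drop_zero]
  have hperm : ((PySem.List.sorted L (fun e => toLex (e.1, toLex (e.2.1, e.2.2))) false).map
      pvProj).Perm (pvMerge starts stops) := by
    refine (((PySem.List.sorted_perm L _ false).map pvProj).trans ?_).trans
      (pvMerge_perm starts stops).symm
    rw [hL, List.map_append, List.map_map, List.map_map]
    refine List.Perm.append ?_ ?_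
    · have h1 : F.map (pvProj ∘ fun d => (f d, "start", d.1)) =
          (pairs.map (fun p => p.1)).map (fun x => (x, true)) := by
        simp [pvProj, hpairs, List.map_map, Function.comp_def]
      rw [h1]
      exact ((PySem.List.sorted_perm (pairs.map (fun p => p.1)) (fun x => x) false).map
        (fun x => (x, true))).symm
    · have h2 : F.map (pvProj ∘ fun d => (g d, "stop", d.1)) =
          (pairs.map (fun p => p.2)).map (fun x => (x, false)) := by
        simp [pvProj, hpairs, List.map_map, Function.comp_def]
      rw [h2]
      exact ((PySem.List.sorted_perm (pairs.map (fun p => p.2)) (fun x => x) false).map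
        (fun x => (x, false))).symm
  have hevs : (PySem.List.sorted L (fun e => toLex (e.1, toLex (e.2.1, e.2.2))) false).map
      pvProj = pvMerge starts stops :=
    List.Perm.eq_of_pairwise (fun a b _ _ => pvEvLE_antisymm a b)
      (pvSortedA_pairwise L hswL)
      (pvMerge_pairwise starts stops
        (PySem.List.sorted_pairwise (pairs.map (fun p => p.1)) (fun x => x))
        (PySem.List.sorted_pairwise (pairs.map (fun p => p.2)) (fun x => x)))
      hperm
  rw [hevs]

-- ===== VERDICT (by name: the statement is the Claim_ definition above) =====
theorem highlightdiffs_spec : Claim_equal_highlightdiffs := by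
  intro text diffs issrc _
  unfold Spec_highlightdiffs highlightdiffs highlightdiffs_alt
  cases issrc
  · simp only [Bool.false_eq_true, if_false]
    exact congrArg String.ofList (pvMain text.toList (diffs.filter (fun d => d.1 != "equal"))
      (fun d => d.2.2.2.1) (fun d => d.2.2.2.2))
  · simp only [if_true]
    exact congrArg String.ofList (pvMain text.toList (diffs.filter (fun d => d.1 != "equal"))
      (fun d => d.2.1) (fun d => d.2.2.1))
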